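-- pv_equiv track=rewrite | github.com/jisha9584/CSE-231-Project-8 | proj08.py | find_max_second_friends
-- ===== SOURCE A (Python) =====
-- def find_max_second_friends(seconds_dict):
--     '''
--     Finding max second-order friends, takes a list of names and the corresponding list of friends and determines who has the most second order friends.
--     seconds_dict: dictionary.
--     Returns: list of strings, int.
--     '''
--     master_list = []
--     max_num = -1
--     for val in seconds_dict.values():
--         number = len(val)
--         if number > max_num:
--             max_num = number
--
--     for key, value in seconds_dict.items():
--         if max_num == len(value):
--             master_list.append(key)
--     return master_list, max_num
-- ===== SOURCE B (Python) =====
-- def find_max_second_friends(seconds_dict):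
--     master_list = []
--     max_num = -1
--     for key, value in seconds_dict.items():
--         n = len(value)
--         if n > max_num:
--             max_num = n
--             master_list = [key]
--         elif n == max_num:
--             master_list.append(key)
--     return master_list, max_num
-- ===== Notes on version B (the rewrite author's own statement) =====
-- stated objective: alternative
-- what changed: Replaces A's two sequential passes (one to find the maximum value-list length, one to collect matching keys) with a single fused pass that maintains the running maximum and resets/extends the key list on the fly.
import Mathlib
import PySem

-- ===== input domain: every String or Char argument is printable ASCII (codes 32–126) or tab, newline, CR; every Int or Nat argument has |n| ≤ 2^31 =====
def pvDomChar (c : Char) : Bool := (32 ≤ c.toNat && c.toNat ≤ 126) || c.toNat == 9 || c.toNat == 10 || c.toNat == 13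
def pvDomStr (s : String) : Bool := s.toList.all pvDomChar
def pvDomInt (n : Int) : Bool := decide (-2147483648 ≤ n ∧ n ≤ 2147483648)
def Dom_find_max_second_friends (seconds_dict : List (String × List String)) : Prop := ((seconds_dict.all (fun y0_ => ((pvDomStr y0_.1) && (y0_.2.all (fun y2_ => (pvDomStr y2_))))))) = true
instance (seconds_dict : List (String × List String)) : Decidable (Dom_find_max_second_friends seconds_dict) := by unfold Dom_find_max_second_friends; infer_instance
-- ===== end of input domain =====

-- B fuses A's two passes into one loop with reset-on-new-max; same values, same order.

-- ===== PORT A =====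
-- first loop: max_num over len(val) starting from -1; second loop: collect keys with max_num == len(value)
def find_max_second_friends (seconds_dict : List (String × List String)) : List String × Int :=
  let max_num : Int :=
    seconds_dict.foldl (fun (m : Int) kv =>
      if (kv.2.length : Int) > m then (kv.2.length : Int) else m) (-1)
  let master_list : List String :=
    seconds_dict.foldl (fun (l : List String) kv =>
      if max_num == (kv.2.length : Int) then l ++ [kv.1] else l) []
  (master_list, max_num)

-- ===== PORT B =====
-- single pass: (max_num, master_list) with reset on strictly larger, append on equal
def find_max_second_friends_alt (seconds_dict : List (String × List String)) : List String × Int :=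
  let st : Int × List String :=
    seconds_dict.foldl (fun (st : Int × List String) kv =>
      let n : Int := kv.2.length
      if n > st.1 then (n, [kv.1])
      else if n == st.1 then (st.1, st.2 ++ [kv.1])
      else st) (-1, [])
  (st.2, st.1)

-- ===== PRECONDITION & SPEC =====
def Spec_find_max_second_friends (seconds_dict : List (String × List String)) (out : List String × Int) : Prop := out = find_max_second_friends_alt seconds_dict
instance (seconds_dict : List (String × List String)) (out : List String × Int) : Decidable (Spec_find_max_second_friends seconds_dict out) := by unfold Spec_find_max_second_friends; infer_instance

-- ===== CLAIM (what is proved, stated in full; the proofs are below) =====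
def Claim_equal_find_max_second_friends : Prop := ∀ (seconds_dict : List (String × List String)), Dom_find_max_second_friends seconds_dict → Spec_find_max_second_friends seconds_dict (find_max_second_friends seconds_dict)

-- ===== LEMMAS AND PROOFS =====

-- the max fold of port A, started from m
def pvMax (d : List (String × List String)) (m : Int) : Int :=
  d.foldl (fun (m : Int) kv => if (kv.2.length : Int) > m then (kv.2.length : Int) else m) m

-- the key-collecting fold of port A for a fixed max value v
def pvKeys (v : Int) (d : List (String × List String)) : List String :=
  d.foldl (fun (l : List String) kv => if v == (kv.2.length : Int) then l ++ [kv.1] else l) []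

lemma pvKeys_cons (v : Int) (kv : String × List String) (d : List (String × List String)) :
    pvKeys v (kv :: d) =
      (if v == (kv.2.length : Int) then [kv.1] else []) ++ pvKeys v d := by
  have h : ∀ (d : List (String × List String)) (l : List String),
      d.foldl (fun (l : List String) kv => if v == (kv.2.length : Int) then l ++ [kv.1] else l) l
        = l ++ pvKeys v d := by
    intro d
    induction d with
    | nil => intro l; simp [pvKeys]
    | cons hd tl ih =>
      intro l
      simp only [pvKeys, List.foldl_cons]
      rw [ih, ih]
      split <;> simp
  simp only [pvKeys, List.foldl_cons]
  rw [h]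
  split <;> simp [pvKeys]

lemma pvMax_ge (d : List (String × List String)) (m : Int) : m ≤ pvMax d m := by
  induction d generalizing m with
  | nil => simp [pvMax]
  | cons hd tl ih =>
    simp only [pvMax, List.foldl_cons]
    split
    · exact le_trans (by omega) (ih _)
    · exact ih m

-- invariant of B's single pass: final max is pvMax; final list is pvKeys of the final max,
-- prefixed by the incoming list exactly when no later element beats the incoming max
lemma bfold_inv (d : List (String × List String)) (m : Int) (l : List String) :
    d.foldl (fun (st : Int × List String) kv =>
      let n : Int := kv.2.length
      if n > st.1 then (n, [kv.1])
      else if n == st.1 then (st.1, st.2 ++ [kv.1])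
      else st) (m, l)
    = (pvMax d m, if pvMax d m > m then pvKeys (pvMax d m) d else l ++ pvKeys (pvMax d m) d) := by
  induction d generalizing m l with
  | nil => simp [pvMax, pvKeys]
  | cons hd tl ih =>
    have hM : pvMax (hd :: tl) m = pvMax tl (if (hd.2.length : Int) > m then (hd.2.length : Int) else m) := by
      simp [pvMax]
    have hK := pvKeys_cons (pvMax (hd :: tl) m) hd tl
    simp only [List.foldl_cons]
    by_cases h1 : (hd.2.length : Int) > m
    · simp only [if_pos h1]
      rw [ih]
      have hMge := pvMax_ge tl (hd.2.length : Int)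
      rw [hM, if_pos h1] at hK ⊢
      by_cases h2 : pvMax tl (hd.2.length : Int) > (hd.2.length : Int)
      · have hne : ¬ (pvMax tl (hd.2.length : Int) == (hd.2.length : Int)) := by
          simp only [beq_iff_eq]; omega
        rw [if_pos h2, if_pos (by omega : pvMax tl (hd.2.length : Int) > m)]
        rw [hK]
        simp [hne]
      · have heq : pvMax tl (hd.2.length : Int) = (hd.2.length : Int) := by omega
        rw [if_neg h2, if_pos (by omega : pvMax tl (hd.2.length : Int) > m)]
        rw [hK]
        simp [heq]
    · have h1' : ¬ ((hd.2.length : Int) > m) := h1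
      rw [if_neg h1']
      rw [hM, if_neg h1'] at hK ⊢
      have hMge := pvMax_ge tl m
      by_cases heq : (hd.2.length : Int) == m
      · rw [if_pos heq]
        rw [ih]
        have heq' : (hd.2.length : Int) = m := by simpa using heq
        by_cases h2 : pvMax tl m > m
        · have hne : ¬ (pvMax tl m == (hd.2.length : Int)) := by
            simp only [beq_iff_eq]; omega
          rw [if_pos h2, if_pos h2, hK]
          simp [hne]
        · have hmm : pvMax tl m = m := by omega
          rw [if_neg h2, if_neg h2, hK]
          simp [hmm, heq']
      · rw [if_neg heq]
        rw [ih]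
        have hlt : (hd.2.length : Int) < m := by
          have : (hd.2.length : Int) ≠ m := by simpa using heq
          omega
        have hne : ¬ (pvMax tl m == (hd.2.length : Int)) := by
          simp only [beq_iff_eq]; omega
        rw [hK]
        simp [hne]

-- ===== VERDICT (by name: the statement is the Claim_ definition above) =====
theorem find_max_second_friends_spec : Claim_equal_find_max_second_friends := by
  intro d _
  unfold Spec_find_max_second_friends find_max_second_friends find_max_second_friends_alt
  rw [bfold_inv]
  have hge := pvMax_ge d (-1)
  simp only [pvMax, pvKeys]
  split <;> simp
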